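-- pv_equiv track=rewrite | github.com/triposat/100_Days_Code_Challenge | Day6/Maximum_of_Each_key_in_List.py | Maximum_Key
-- ===== SOURCE A (Python) =====
-- def Maximum_Key(Test_list):
--     Result = {}
--     for dictionary in Test_list:
--         for key, value in dictionary.items():
--             if key in Result:
--                 Result[key] = max(Result[key], value)
--             else:
--                 Result[key] = value
--     return Result
-- ===== SOURCE B (Python) =====
-- def Maximum_Key(Test_list):
--     groups = {}
--     for dictionary in Test_list:
--         for key, value in dictionary.items():
--             groups[key] = groups.get(key, []) + [value]
--     return {key: max(values) for key, values in groups.items()}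
-- ===== Notes on version B (the rewrite author's own statement) =====
-- stated objective: alternative
-- what changed: B materializes an intermediate dict mapping each key to the list of all its values (group phase), then computes each key's max in a separate reduction pass, instead of A's single interleaved running-max update.
import Mathlib
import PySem

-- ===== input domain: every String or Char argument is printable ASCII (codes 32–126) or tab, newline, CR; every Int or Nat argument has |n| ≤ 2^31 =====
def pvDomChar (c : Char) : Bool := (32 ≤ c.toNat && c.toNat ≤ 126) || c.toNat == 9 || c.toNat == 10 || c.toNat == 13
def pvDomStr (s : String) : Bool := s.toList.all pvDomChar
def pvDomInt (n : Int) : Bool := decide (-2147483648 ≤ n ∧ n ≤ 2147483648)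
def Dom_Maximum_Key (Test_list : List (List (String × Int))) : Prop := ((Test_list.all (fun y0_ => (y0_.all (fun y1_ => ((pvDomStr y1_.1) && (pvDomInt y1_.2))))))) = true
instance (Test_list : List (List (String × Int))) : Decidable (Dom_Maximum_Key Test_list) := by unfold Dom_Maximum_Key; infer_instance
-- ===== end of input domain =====

-- B groups all values per key into a materialized dict of lists, then reduces each list with max in a
-- second pass, instead of A's single interleaved running-max update; same cost, different decomposition.

-- ===== PORT A =====
def Maximum_Key (Test_list : List (List (String × Int))) : List (String × Int) :=
  (Test_list.foldl
    (fun (Result : PySem.Dict String Int) dictionary =>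
      dictionary.foldl
        (fun Result kv =>
          match Result.get? kv.1 with          -- 'if key in Result: … Result[key] …'
          | some old => Result.insert kv.1 (max old kv.2)
          | none => Result.insert kv.1 kv.2)
        Result)
    PySem.Dict.empty).items

-- ===== PORT B =====
def Maximum_Key_alt (Test_list : List (List (String × Int))) : List (String × Int) :=
  let groups : PySem.Dict String (List Int) :=
    Test_list.foldl
      (fun groups dictionary =>
        dictionary.foldl
          (fun groups kv => groups.insert kv.1 (groups.getD kv.1 [] ++ [kv.2]))
          groups)
      PySem.Dict.empty
  -- max(values): every value list is nonempty by construction, so the .getD 0 default is unreachable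
  groups.items.map (fun p => (p.1, (PySem.List.max? p.2 (fun y => y)).getD 0))

-- ===== PRECONDITION & SPEC =====
def Spec_Maximum_Key (Test_list : List (List (String × Int))) (out : List (String × Int)) : Prop := out = Maximum_Key_alt Test_list
instance (Test_list : List (List (String × Int))) (out : List (String × Int)) : Decidable (Spec_Maximum_Key Test_list out) := by unfold Spec_Maximum_Key; infer_instance

-- ===== CLAIM (what is proved, stated in full; the proofs are below) =====
def Claim_equal_Maximum_Key : Prop := ∀ (Test_list : List (List (String × Int))), Dom_Maximum_Key Test_list → Spec_Maximum_Key Test_list (Maximum_Key Test_list)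

-- ===== LEMMAS AND PROOFS =====

-- max of a Python list, as Maximum_Key_alt's reduction computes it
def mxv (vs : List Int) : Int := (PySem.List.max? vs (fun y => y)).getD 0

lemma mxv_singleton (v : Int) : mxv [v] = v := by
  simp [mxv, PySem.List.max?_id_cons]

lemma mxv_append (vs : List Int) (hv : vs ≠ []) (v : Int) :
    mxv (vs ++ [v]) = max (mxv vs) v := by
  cases vs with
  | nil => exact absurd rfl hv
  | cons x t => simp [mxv, PySem.List.max?_id_cons, List.foldl_append]

-- the invariant of the two loops over the same stream of (key, value) pairs:
-- A's running-max dict is the per-entry max image of B's grouping dict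
lemma loop_inv (L : List (String × Int)) (dA : PySem.Dict String Int)
    (g : PySem.Dict String (List Int))
    (hnd : g.keys.Nodup)
    (hrel : dA.items = g.items.map (fun p => (p.1, mxv p.2)))
    (hne : ∀ p ∈ g.items, p.2 ≠ []) :
    (L.foldl
      (fun Result kv =>
        match Result.get? kv.1 with
        | some old => Result.insert kv.1 (max old kv.2)
        | none => Result.insert kv.1 kv.2) dA).items
    = (L.foldl (fun groups kv => groups.insert kv.1 (groups.getD kv.1 [] ++ [kv.2])) g).items.map
        (fun p => (p.1, mxv p.2)) := by
  induction L generalizing dA g with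
  | nil => simpa using hrel
  | cons kv rest ih =>
    obtain ⟨k, v⟩ := kv
    have hkeys : dA.keys = g.keys := by
      show dA.items.map (·.1) = g.items.map (·.1)
      rw [hrel, List.map_map]; rfl
    by_cases hk : k ∈ g.keys
    · -- key already present: both dicts update in place
      have hgc : g.contains k = true := (PySem.Dict.contains_iff_mem_keys g k).mpr hk
      have hAc : dA.contains k = true := by
        rw [PySem.Dict.contains_iff_mem_keys, hkeys]; exact hk
      obtain ⟨vs, hvs⟩ : ∃ vs, g.get? k = some vs := by
        rcases h : g.get? k with _ | vs
        · exact absurd ((PySem.Dict.get?_eq_none_iff_not_mem_keys g k).mp h) (by simpa using hk)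
        · exact ⟨vs, rfl⟩
      have hvsne : vs ≠ [] := hne _ (PySem.Dict.mem_items_of_get?_eq_some g hvs)
      have hAget : dA.get? k = some (mxv vs) := by
        have hmem : (k, mxv vs) ∈ dA.items := by
          rw [hrel]
          exact List.mem_map.mpr ⟨(k, vs), PySem.Dict.mem_items_of_get?_eq_some g hvs, rfl⟩
        exact PySem.Dict.get?_of_mem_items dA hmem (hkeys ▸ hnd)
      simp only [List.foldl_cons, hAget, PySem.Dict.getD_of_get?_eq_some g [] hvs]
      rw [ih]
      · -- keys stay nodup
        simpa [PySem.Dict.keys_insert_of_contains _ _ hgc] using hnd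
      · -- the relation is preserved
        rw [PySem.Dict.items_insert_of_contains _ _ hAc,
            PySem.Dict.items_insert_of_contains _ _ hgc, hrel,
            List.map_map, List.map_map]
        refine List.map_congr_left (fun q _ => ?_)
        by_cases hq : q.1 = k
        · simp [Function.comp, hq, mxv_append vs hvsne v]
        · simp [Function.comp, hq]
      · -- value lists stay nonempty
        intro p hp
        rw [PySem.Dict.items_insert_of_contains _ _ hgc] at hp
        obtain ⟨q, hq, hqe⟩ := List.mem_map.mp hp
        by_cases h1 : q.1 = k
        · simp [h1] at hqe; subst hqe; simp [hvsne]
        · simp [h1] at hqe; subst hqe; exact hne _ hq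
    · -- fresh key: both dicts append a new entry
      have hgc : g.contains k = false := by
        rcases h : g.contains k with _ | _
        · rfl
        · exact absurd ((PySem.Dict.contains_iff_mem_keys g k).mp h) hk
      have hAget : dA.get? k = none := by
        rw [PySem.Dict.get?_eq_none_iff_not_mem_keys, hkeys]; exact hk
      simp only [List.foldl_cons, hAget, PySem.Dict.getD_of_not_contains g [] hgc, List.nil_append]
      have hAc : dA.contains k = false := by
        rcases h : dA.contains k with _ | _
        · rfl
        · exact absurd (hkeys ▸ (PySem.Dict.contains_iff_mem_keys dA k).mp h) hk
      rw [ih]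
      · rw [PySem.Dict.keys_insert_of_not_contains _ _ hgc]
        simp [List.nodup_append, hnd]; exact fun a ha he => hk (he ▸ ha)
      · rw [PySem.Dict.items_insert_of_not_contains _ _ hAc,
            PySem.Dict.items_insert_of_not_contains _ _ hgc, hrel]
        simp [mxv_singleton]
      · intro p hp
        rw [PySem.Dict.items_insert_of_not_contains _ _ hgc] at hp
        rcases List.mem_append.mp hp with h | h
        · exact hne _ h
        · simp at h; subst h; simp

-- ===== VERDICT (by name: the statement is the Claim_ definition above) =====
theorem Maximum_Key_spec : Claim_equal_Maximum_Key := by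
  intro Test_list _
  show Maximum_Key Test_list = Maximum_Key_alt Test_list
  unfold Maximum_Key Maximum_Key_alt
  rw [← List.foldl_flatten, ← List.foldl_flatten]
  exact loop_inv Test_list.flatten PySem.Dict.empty PySem.Dict.empty (by exact PySem.Dict.nodup_keys_empty) (by rfl) (by intro p hp; simp [PySem.Dict.empty] at hp)
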